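-- pv_equiv track=rewrite | github.com/RPGheros/ShellRPG-client | src/shellrpg_server/core/engine.py | _parse_flag_args
-- ===== SOURCE A (Python) =====
-- def _parse_flag_args(args: list[str]) -> dict[str,str]:
--     out = {}
--     key = None
--     current=[]
--     for token in args:
--         if token.startswith("--"):
--             if key:
--                 out[key] = " ".join(current).strip()
--             key = token[2:]
--             current = []
--         else:
--             current.append(token)
--     if key:
--         out[key] = " ".join(current).strip()
--     return out
-- ===== SOURCE B (Python) =====
-- def _parse_flag_args(args: list[str]) -> dict[str, str]:
--     out = {}
--     n = len(args)
--     i = 0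
--     # advance to the first flag; tokens before it are ignored
--     while i < n and not args[i].startswith("--"):
--         i += 1
--     # each iteration consumes one flag and the run of value tokens after it
--     while i < n:
--         key = args[i][2:]
--         vals = []
--         j = i + 1
--         while j < n and not args[j].startswith("--"):
--             vals.append(args[j])
--             j += 1
--         if key:
--             out[key] = " ".join(vals).strip()
--         i = j
--     return out
-- ===== Notes on version B (the rewrite author's own statement) =====
-- stated objective: alternative
-- what changed: A makes one stateful pass carrying a pending key and a growing accumulator list with a final flush after the loop; B instead scans with index pointers, skipping the prefix before the first flag and then consuming, per outer-loop step, one flag plus the whole run of value tokens after it, emitting each entry immediately with no carried state or trailing flush.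
import Mathlib
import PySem

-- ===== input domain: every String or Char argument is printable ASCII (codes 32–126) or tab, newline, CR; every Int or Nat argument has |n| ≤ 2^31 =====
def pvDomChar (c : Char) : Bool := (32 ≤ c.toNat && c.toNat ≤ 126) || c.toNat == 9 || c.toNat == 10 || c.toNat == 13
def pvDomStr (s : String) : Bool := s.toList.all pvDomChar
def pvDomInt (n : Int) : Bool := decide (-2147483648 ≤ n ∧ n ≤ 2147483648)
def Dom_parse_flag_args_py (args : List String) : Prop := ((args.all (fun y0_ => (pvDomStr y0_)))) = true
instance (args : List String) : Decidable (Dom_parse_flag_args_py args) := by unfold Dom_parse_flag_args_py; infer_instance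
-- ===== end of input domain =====

-- B replaces A's single stateful pass (carried pending key + accumulator, final flush) by an
-- index-pointer chunk scan (skip prefix, then consume one flag and its run of values per step);
-- objective: alternative decomposition, same O(n) cost.

-- ===== PORT A =====
-- A-side helper: the duplicated 'if key: out[key] = " ".join(current).strip()' block (key may be None)
def pvFlushA (d : PySem.Dict String String) (okey : Option String) (cur : List String) :
    PySem.Dict String String :=
  match okey with
  | some k => if k ≠ "" then d.insert k (PySem.Str.strip (PySem.Str.join " " cur)) else d
  | none => d

-- A-side helper: the body of A's for-loop, state = (out, key, current)
def pvStepA (s : PySem.Dict String String × Option String × List String) (token : String) :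
    PySem.Dict String String × Option String × List String :=
  if PySem.Str.startswith token "--" then
    (pvFlushA s.1 s.2.1 s.2.2, some (PySem.Str.slice token (some 2) none), [])
  else
    (s.1, s.2.1, s.2.2 ++ [token])

-- A-side helper: the trailing 'if key: …' applied to the final state
def pvFinA (s : PySem.Dict String String × Option String × List String) :
    PySem.Dict String String :=
  pvFlushA s.1 s.2.1 s.2.2

def parse_flag_args_py (args : List String) : List (String × String) :=
  (pvFinA (args.foldl pvStepA (PySem.Dict.empty, none, []))).items

-- ===== PORT B =====
-- B-side helper: 'not args[i].startswith("--")'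
def pvNotFlag (t : String) : Bool := !(PySem.Str.startswith t "--")

-- B's first while loop: advance i to the first flag (args[i] for i < len ported as getD i "")
def pvSkipB (args : List String) (i : Nat) : Nat :=
  if h : i < args.length ∧ pvNotFlag (args.getD i "") then pvSkipB args (i + 1) else i
termination_by args.length - i
decreasing_by omega

-- B's inner while loop: the run of value tokens from j on, returned as (vals, final j)
def pvCollectB (args : List String) (j : Nat) : List String × Nat :=
  if h : j < args.length ∧ pvNotFlag (args.getD j "") then
    (args.getD j "" :: (pvCollectB args (j + 1)).1, (pvCollectB args (j + 1)).2)
  else ([], j)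
termination_by args.length - j
decreasing_by all_goals omega

theorem pvCollectB_ge (args : List String) (j : Nat) : j ≤ (pvCollectB args j).2 := by
  fun_induction pvCollectB args j with
  | case1 j h ih => simpa using by omega
  | case2 j h => simp

-- B's outer while loop: one iteration per flag
def pvMainB (args : List String) (i : Nat) (out : PySem.Dict String String) :
    PySem.Dict String String :=
  if h : i < args.length then
    pvMainB args (pvCollectB args (i + 1)).2
      (if PySem.Str.slice (args.getD i "") (some 2) none ≠ "" then
        out.insert (PySem.Str.slice (args.getD i "") (some 2) none)
          (PySem.Str.strip (PySem.Str.join " " (pvCollectB args (i + 1)).1))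
      else out)
  else out
termination_by args.length - i
decreasing_by have := pvCollectB_ge args (i + 1); omega

def parse_flag_args_py_alt (args : List String) : List (String × String) :=
  (pvMainB args (pvSkipB args 0) PySem.Dict.empty).items

-- ===== PRECONDITION & SPEC =====
def Spec_parse_flag_args_py (args : List String) (out : List (String × String)) : Prop := out = parse_flag_args_py_alt args
instance (args : List String) (out : List (String × String)) : Decidable (Spec_parse_flag_args_py args out) := by unfold Spec_parse_flag_args_py; infer_instance

-- ===== CLAIM (what is proved, stated in full; the proofs are below) =====
def Claim_equal_parse_flag_args_py : Prop := ∀ (args : List String), Dom_parse_flag_args_py args → Spec_parse_flag_args_py args (parse_flag_args_py args)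

-- ===== LEMMAS AND PROOFS =====

-- emit one finished (key, values) chunk
def pvEmit (d : PySem.Dict String String) (k : String) (vals : List String) :
    PySem.Dict String String :=
  if k ≠ "" then d.insert k (PySem.Str.strip (PySem.Str.join " " vals)) else d

-- shared intermediate: process the remaining tokens chunk by chunk (head is the current flag token)
def pvChunkLoop (d : PySem.Dict String String) : List String → PySem.Dict String String
  | [] => d
  | t :: ts =>
    pvChunkLoop (pvEmit d (PySem.Str.slice t (some 2) none) (ts.takeWhile pvNotFlag))
      (ts.dropWhile pvNotFlag)
termination_by l => l.length
decreasing_by exact Nat.lt_succ_of_le (List.length_dropWhile_le _ _)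

theorem pvFlushA_some (d : PySem.Dict String String) (k : String) (cur : List String) :
    pvFlushA d (some k) cur = pvEmit d k cur := rfl

theorem pvFlushA_none (d : PySem.Dict String String) (cur : List String) :
    pvFlushA d none cur = d := rfl

theorem pvNotFlag_true {t : String} (hf : PySem.Str.startswith t "--" = false) :
    pvNotFlag t = true := by simp only [pvNotFlag, hf, Bool.not_false]

theorem pvNotFlag_false {t : String} (hf : PySem.Str.startswith t "--" = true) :
    pvNotFlag t = false := by simp only [pvNotFlag, hf, Bool.not_true]

theorem pvDropWhile_eq_drop (p : String → Bool) (l : List String) :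
    l.drop (l.takeWhile p).length = l.dropWhile p := by
  induction l with
  | nil => simp
  | cons t ts ih => by_cases h : p t <;> simp [h, ih]

theorem pvCollectB_eq (args : List String) (j : Nat) :
    pvCollectB args j =
      ((args.drop j).takeWhile pvNotFlag, j + ((args.drop j).takeWhile pvNotFlag).length) := by
  fun_induction pvCollectB args j with
  | case1 j h ih =>
    obtain ⟨hj, hfl⟩ := h
    have hd : args.drop j = args[j] :: args.drop (j + 1) := List.drop_eq_getElem_cons hj
    have hg : args.getD j "" = args[j] := by simp [List.getD_eq_getElem?_getD, hj]
    rw [hg] at hfl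
    rw [ih, hd, List.takeWhile_cons_of_pos hfl]
    refine Prod.ext ?_ ?_
    · simpa using hg
    · simp; omega
  | case2 j h =>
    rcases Nat.lt_or_ge j args.length with hj | hj
    · have hd : args.drop j = args[j] :: args.drop (j + 1) := List.drop_eq_getElem_cons hj
      have hg : args.getD j "" = args[j] := by simp [List.getD_eq_getElem?_getD, hj]
      have hfl : pvNotFlag args[j] = false := by
        rcases Bool.eq_false_or_eq_true (pvNotFlag args[j]) with h' | h'
        · exact absurd ⟨hj, hg ▸ h'⟩ h
        · exact h'
      rw [hd, List.takeWhile_cons_of_neg (by simp [hfl])]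
      simp
    · simp [List.drop_eq_nil_of_le hj]

theorem pvSkipB_eq (args : List String) (i : Nat) :
    args.drop (pvSkipB args i) = (args.drop i).dropWhile pvNotFlag := by
  fun_induction pvSkipB args i with
  | case1 i h ih =>
    obtain ⟨hj, hfl⟩ := h
    have hd : args.drop i = args[i] :: args.drop (i + 1) := List.drop_eq_getElem_cons hj
    have hg : args.getD i "" = args[i] := by simp [List.getD_eq_getElem?_getD, hj]
    rw [hg] at hfl
    rw [ih, hd, List.dropWhile_cons_of_pos hfl]
  | case2 i h =>
    rcases Nat.lt_or_ge i args.length with hj | hj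
    · have hd : args.drop i = args[i] :: args.drop (i + 1) := List.drop_eq_getElem_cons hj
      have hg : args.getD i "" = args[i] := by simp [List.getD_eq_getElem?_getD, hj]
      have hfl : pvNotFlag args[i] = false := by
        rcases Bool.eq_false_or_eq_true (pvNotFlag args[i]) with h' | h'
        · exact absurd ⟨hj, hg ▸ h'⟩ h
        · exact h'
      rw [hd, List.dropWhile_cons_of_neg (by simp [hfl])]
    · simp [List.drop_eq_nil_of_le hj]

theorem pvMainB_eq (args : List String) (i : Nat) (out : PySem.Dict String String) :
    pvMainB args i out = pvChunkLoop out (args.drop i) := by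
  fun_induction pvMainB args i out with
  | case1 i out h ih =>
    have hd : args.drop i = args[i] :: args.drop (i + 1) := List.drop_eq_getElem_cons h
    have hg : args.getD i "" = args[i] := by simp [List.getD_eq_getElem?_getD, h]
    have hc := pvCollectB_eq args (i + 1)
    have hdrop :
        args.drop (i + 1 + ((args.drop (i + 1)).takeWhile pvNotFlag).length) =
          (args.drop (i + 1)).dropWhile pvNotFlag := by
      rw [← pvDropWhile_eq_drop, List.drop_drop]
    simp only [dite_eq_ite] at ih
    rw [ih, hd, pvChunkLoop, hc, hdrop]
    simp only [hg, pvEmit]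
  | case2 i out h =>
    have hnil : args.drop i = [] := List.drop_eq_nil_of_le (by omega)
    simp [hnil, pvChunkLoop]

-- A's fold, starting with a pending key, equals the chunk loop on the rest
theorem pvFoldA_some (rest : List String) (d : PySem.Dict String String) (k : String)
    (cur : List String) :
    pvFinA (rest.foldl pvStepA (d, some k, cur)) =
      pvChunkLoop (pvEmit d k (cur ++ rest.takeWhile pvNotFlag)) (rest.dropWhile pvNotFlag) := by
  induction rest generalizing d k cur with
  | nil => simp [pvChunkLoop, pvFinA, pvFlushA_some]
  | cons t ts ih =>
    rcases Bool.eq_false_or_eq_true (PySem.Str.startswith t "--") with hf | hf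
    · have hnf := pvNotFlag_false hf
      rw [List.foldl_cons, List.dropWhile_cons_of_neg (by simp [hnf]),
        List.takeWhile_cons_of_neg (by simp [hnf])]
      have hstep : pvStepA (d, some k, cur) t =
          (pvEmit d k cur, some (PySem.Str.slice t (some 2) none), []) := by
        unfold pvStepA; rw [hf]; rfl
      rw [hstep, ih, pvChunkLoop]
      simp
    · have hnf := pvNotFlag_true hf
      rw [List.foldl_cons, List.dropWhile_cons_of_pos hnf, List.takeWhile_cons_of_pos hnf]
      have hstep : pvStepA (d, some k, cur) t = (d, some k, cur ++ [t]) := by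
        unfold pvStepA; rw [hf]; rfl
      rw [hstep, ih]
      simp

-- A's fold with no pending key equals the chunk loop after the skipped prefix
theorem pvFoldA_none (rest : List String) (d : PySem.Dict String String) (cur : List String) :
    pvFinA (rest.foldl pvStepA (d, none, cur)) =
      pvChunkLoop d (rest.dropWhile pvNotFlag) := by
  induction rest generalizing cur with
  | nil => simp [pvChunkLoop, pvFinA, pvFlushA_none]
  | cons t ts ih =>
    rcases Bool.eq_false_or_eq_true (PySem.Str.startswith t "--") with hf | hf
    · have hnf := pvNotFlag_false hf
      rw [List.foldl_cons, List.dropWhile_cons_of_neg (by simp [hnf])]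
      have hstep : pvStepA (d, none, cur) t =
          (d, some (PySem.Str.slice t (some 2) none), []) := by
        unfold pvStepA; rw [hf]; rfl
      rw [hstep, pvFoldA_some, pvChunkLoop]
      simp
    · have hnf := pvNotFlag_true hf
      rw [List.foldl_cons, List.dropWhile_cons_of_pos hnf]
      have hstep : pvStepA (d, none, cur) t = (d, none, cur ++ [t]) := by
        unfold pvStepA; rw [hf]; rfl
      rw [hstep]
      exact ih _

-- ===== VERDICT (by name: the statement is the Claim_ definition above) =====
theorem parse_flag_args_py_spec : Claim_equal_parse_flag_args_py := by
  intro args _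
  show parse_flag_args_py args = parse_flag_args_py_alt args
  unfold parse_flag_args_py parse_flag_args_py_alt
  congr 1
  rw [pvFoldA_none, pvMainB_eq, pvSkipB_eq]
  simp
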